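-- pv_equiv track=rewrite | github.com/kkr010128/codebert | problem224/problem224_113.py | contain_two
-- ===== SOURCE A (Python) =====
-- def contain_one(n):
--     a = 100
--     max_num = 10**a
--
--     while 1:
--         if n // max_num == 0:
--             a -= 1
--             max_num = 10**a
--         else:
--             break
--
--     return 9*a+(n//max_num)
--
-- def contain_two(n):
--     if n <=10:
--         return 0
--
--     a = 100
--     max_num = 10**a
--
--     while 1:
--         if n // max_num == 0:
--             a -= 1
--             max_num = 10**a
--         else:
--             break
--
--     cnt = 0
--     #10^a位まで
--     for i in range(1, a):
--         cnt += 9*9*i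
--
--     #10^a位
--     tmp = n // max_num
--     cnt += 9*a*(tmp-1)
--
--     #nの10^a桁より小さい数
--     tmp = n % max_num
--     #怪しい
--     if tmp != 0:
--         cnt += contain_one(tmp)
--
--     return cnt
-- ===== SOURCE B (Python) =====
-- def _mag(n):
--     # magnitude of n (n >= 1): largest power of 10 not exceeding n, counting up
--     a, p = 0, 1
--     while p * 10 <= n:
--         p *= 10
--         a += 1
--     return a, p
--
-- def contain_two(n):
--     if n <= 10:
--         return 0
--     a, p = _mag(n)
--     cnt = 81 * a * (a - 1) // 2 + 9 * a * (n // p - 1)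
--     tmp = n % p
--     if tmp != 0:
--         b, q = _mag(tmp)
--         cnt += 9 * b + tmp // q
--     return cnt
-- ===== Notes on version B (the rewrite author's own statement) =====
-- stated objective: simpler
-- what changed: B finds the magnitude by multiplying a power of 10 upward from 1 instead of decrementing an exponent from 100, and replaces the accumulation loop over range(1,a) with the closed form 81*a*(a-1)//2; the contain_one helper is inlined as the same upward magnitude scan.
import Mathlib
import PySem

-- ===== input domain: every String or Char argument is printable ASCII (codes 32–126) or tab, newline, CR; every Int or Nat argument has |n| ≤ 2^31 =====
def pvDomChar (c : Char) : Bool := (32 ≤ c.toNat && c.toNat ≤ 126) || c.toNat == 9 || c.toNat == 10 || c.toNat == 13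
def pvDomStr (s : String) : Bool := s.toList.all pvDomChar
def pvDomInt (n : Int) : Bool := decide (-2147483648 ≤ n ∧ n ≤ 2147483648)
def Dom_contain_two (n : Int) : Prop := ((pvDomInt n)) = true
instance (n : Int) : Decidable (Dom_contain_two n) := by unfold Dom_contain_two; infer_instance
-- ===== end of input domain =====

-- B replaces A's exponent-decrementing magnitude search (from 10^100 down) by an upward scan
-- multiplying a power of 10 from 1, and the range(1,a) accumulation loop by the closed form
-- 81*a*(a-1)//2 (objective: simpler).

-- ===== PORT A =====
-- A's `while 1: if n // max_num == 0: a -= 1 ... else: break` starting at a = 100: structural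
-- recursion on the exponent.  In Python the loop only ever runs with n ≥ 1 (callers guarantee it),
-- so it always stops at or before a = 0; the base case returns 0 accordingly.
def findA (n : Int) : Nat → Nat
  | 0 => 0
  | a + 1 => if PySem.Int.floordiv n (10 ^ (a + 1)) = 0 then findA n a else (a + 1)

def containOneA (m : Int) : Int :=
  let a := findA m 100
  9 * (a : Int) + PySem.Int.floordiv m (10 ^ a)

def contain_two (n : Int) : Int :=
  if n ≤ 10 then 0
  else
    let a := findA n 100
    let maxNum : Int := 10 ^ a
    let cnt := (PySem.List.pyRange 1 (a : Int) 1).foldl (fun c i => c + 9 * 9 * i) 0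
    let tmp := PySem.Int.floordiv n maxNum
    let cnt := cnt + 9 * (a : Int) * (tmp - 1)
    let tmp := PySem.Int.mod n maxNum
    if tmp ≠ 0 then cnt + containOneA tmp else cnt

-- ===== PORT B =====
-- Source B's `_mag`: upward while loop `while p*10 <= n: p *= 10; a += 1`, ported with a fuel
-- counter as the totality device (fuel 100 is never exhausted for |n| ≤ 2^31, which needs
-- at most 10 iterations; the loop body is otherwise step-for-step).
def magUp (n p : Int) (a : Nat) : Nat → Nat × Int
  | 0 => (a, p)
  | fuel + 1 => if p * 10 ≤ n then magUp n (p * 10) (a + 1) fuel else (a, p)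

def contain_two_alt (n : Int) : Int :=
  if n ≤ 10 then 0
  else
    let ap := magUp n 1 0 100
    let a : Int := (ap.1 : Int)
    let p := ap.2
    let cnt := PySem.Int.floordiv (81 * a * (a - 1)) 2 + 9 * a * (PySem.Int.floordiv n p - 1)
    let tmp := PySem.Int.mod n p
    if tmp ≠ 0 then
      let bq := magUp tmp 1 0 100
      cnt + (9 * (bq.1 : Int) + PySem.Int.floordiv tmp bq.2)
    else cnt

-- ===== PRECONDITION & SPEC =====
def Spec_contain_two (n : Int) (out : Int) : Prop := out = contain_two_alt n
instance (n : Int) (out : Int) : Decidable (Spec_contain_two n out) := by unfold Spec_contain_two; infer_instance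

-- ===== CLAIM (what is proved, stated in full; the proofs are below) =====
def Claim_equal_contain_two : Prop := ∀ (n : Int), Dom_contain_two n → Spec_contain_two n (contain_two n)

-- ===== LEMMAS AND PROOFS =====

lemma fd_zero (n m : Int) (h0 : 0 ≤ n) (h : n < m) : PySem.Int.floordiv n m = 0 := by
  have hm : 0 < m := lt_of_le_of_lt h0 h
  rw [PySem.Int.floordiv_eq_ediv_of_pos hm]
  exact Int.ediv_eq_zero_of_lt h0 h

lemma fd_ne_zero (n m : Int) (hm : 0 < m) (h : m ≤ n) : PySem.Int.floordiv n m ≠ 0 := by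
  have h1 : 1 ≤ PySem.Int.floordiv n m := by
    rw [PySem.Int.floordiv_eq_ediv_of_pos hm]
    exact (Int.le_ediv_iff_mul_le hm).mpr (by omega)
  omega

lemma findA_eq (n : Int) (k : Nat) (hk1 : 10 ^ k ≤ n) (hk2 : n < 10 ^ (k + 1)) :
    ∀ c, k ≤ c → findA n c = k := by
  have hn0 : 0 ≤ n := le_trans (by positivity) hk1
  intro c
  induction c with
  | zero =>
    intro h
    have hk0 : k = 0 := by omega
    subst hk0
    rfl
  | succ m ih =>
    intro h
    by_cases hkm : k = m + 1
    · subst hkm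
      have hne := fd_ne_zero n (10 ^ (m + 1)) (by positivity) hk1
      simp only [findA]
      rw [if_neg hne]
    · have hkm' : k ≤ m := by omega
      have hlt : n < 10 ^ (m + 1) := lt_of_lt_of_le hk2 (pow_le_pow_right₀ (by norm_num) (by omega))
      simp only [findA]
      rw [if_pos (fd_zero n _ hn0 hlt)]
      exact ih hkm'

lemma magUp_eq (n : Int) (k : Nat) (hk1 : 10 ^ k ≤ n) (hk2 : n < 10 ^ (k + 1)) :
    ∀ fuel a, k ≤ a + fuel → a ≤ k → magUp n (10 ^ a) a fuel = (k, (10 : Int) ^ k) := by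
  intro fuel
  induction fuel with
  | zero =>
    intro a h1 h2
    have ha' : a = k := by omega
    subst ha'
    rfl
  | succ f ih =>
    intro a h1 h2
    by_cases hak : a = k
    · subst hak
      have hcond : ¬((10 : Int) ^ a * 10 ≤ n) := by
        intro hle
        rw [show (10 : Int) ^ a * 10 = 10 ^ (a + 1) by ring] at hle
        omega
      simp only [magUp]
      rw [if_neg hcond]
    · have hcond : (10 : Int) ^ a * 10 ≤ n := by
        rw [show (10 : Int) ^ a * 10 = 10 ^ (a + 1) by ring]
        exact le_trans (pow_le_pow_right₀ (by norm_num) (by omega)) hk1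
      simp only [magUp]
      rw [if_pos hcond, show (10 : Int) ^ a * 10 = 10 ^ (a + 1) by ring]
      exact ih (a + 1) (by omega) (by omega)

lemma exists_decade (m : Int) (h1 : 1 ≤ m) (h2 : m < 10 ^ 10) :
    ∃ k, k ≤ 9 ∧ 10 ^ k ≤ m ∧ m < 10 ^ (k + 1) := by
  by_cases c1 : m < 10 ^ 1
  · refine ⟨0, by omega, ?_, ?_⟩
    · norm_num; omega
    · norm_num at c1 ⊢; omega
  by_cases c2 : m < 10 ^ 2
  · refine ⟨1, by omega, ?_, ?_⟩
    · norm_num at c1 ⊢; omega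
    · norm_num at c2 ⊢; omega
  by_cases c3 : m < 10 ^ 3
  · refine ⟨2, by omega, ?_, ?_⟩
    · norm_num at c2 ⊢; omega
    · norm_num at c3 ⊢; omega
  by_cases c4 : m < 10 ^ 4
  · refine ⟨3, by omega, ?_, ?_⟩
    · norm_num at c3 ⊢; omega
    · norm_num at c4 ⊢; omega
  by_cases c5 : m < 10 ^ 5
  · refine ⟨4, by omega, ?_, ?_⟩
    · norm_num at c4 ⊢; omega
    · norm_num at c5 ⊢; omega
  by_cases c6 : m < 10 ^ 6
  · refine ⟨5, by omega, ?_, ?_⟩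
    · norm_num at c5 ⊢; omega
    · norm_num at c6 ⊢; omega
  by_cases c7 : m < 10 ^ 7
  · refine ⟨6, by omega, ?_, ?_⟩
    · norm_num at c6 ⊢; omega
    · norm_num at c7 ⊢; omega
  by_cases c8 : m < 10 ^ 8
  · refine ⟨7, by omega, ?_, ?_⟩
    · norm_num at c7 ⊢; omega
    · norm_num at c8 ⊢; omega
  by_cases c9 : m < 10 ^ 9
  · refine ⟨8, by omega, ?_, ?_⟩
    · norm_num at c8 ⊢; omega
    · norm_num at c9 ⊢; omega
  · refine ⟨9, by omega, ?_, ?_⟩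
    · norm_num at c9 ⊢; omega
    · norm_num at h2 ⊢; omega

lemma gauss (k : Nat) :
    (PySem.List.pyRange 1 (k : Int) 1).foldl (fun c i => c + 9 * 9 * i) 0
      = PySem.Int.floordiv (81 * (k : Int) * ((k : Int) - 1)) 2 := by
  induction k with
  | zero =>
    rw [PySem.List.pyRange_one_eq_nil (by norm_num)]
    simp only [List.foldl_nil]
    rw [PySem.Int.floordiv_eq_ediv_of_pos (by norm_num : (0:Int) < 2)]
    norm_num
  | succ m ih =>
    have hcast : ((m + 1 : Nat) : Int) = (m : Int) + 1 := by push_cast; ring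
    by_cases hm0 : m = 0
    · subst hm0
      rw [hcast, PySem.List.pyRange_one_eq_nil (by norm_num)]
      simp only [List.foldl_nil]
      rw [PySem.Int.floordiv_eq_ediv_of_pos (by norm_num : (0:Int) < 2)]
      norm_num
    · have hm1 : (1 : Int) ≤ (m : Int) := by exact_mod_cast Nat.one_le_iff_ne_zero.mpr hm0
      rw [hcast, PySem.List.pyRange_one_succ_right hm1,
        List.foldl_append]
      simp only [List.foldl_cons, List.foldl_nil]
      rw [ih]
      obtain ⟨c, hc⟩ : Even (((m : Int) - 1) * (m : Int)) := by
        have h := Int.even_mul_succ_self ((m : Int) - 1)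
        simpa using h
      have e1 : (81 : Int) * (m : Int) * ((m : Int) - 1) = 2 * (81 * c) := by
        have h : (81 : Int) * (m : Int) * ((m : Int) - 1) = 81 * (((m : Int) - 1) * (m : Int)) := by ring
        rw [h, hc]; ring
      have e2 : (81 : Int) * ((m : Int) + 1) * (((m : Int) + 1) - 1) = 2 * (81 * c + 81 * (m : Int)) := by
        have h : (81 : Int) * ((m : Int) + 1) * (((m : Int) + 1) - 1)
            = 81 * (((m : Int) - 1) * (m : Int)) + 162 * (m : Int) := by ring
        rw [h, hc]; ring
      rw [PySem.Int.floordiv_eq_ediv_of_pos (by norm_num : (0:Int) < 2),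
          PySem.Int.floordiv_eq_ediv_of_pos (by norm_num : (0:Int) < 2), e1, e2,
          Int.mul_ediv_cancel_left _ (by norm_num), Int.mul_ediv_cancel_left _ (by norm_num)]
      ring

lemma containOne_eq (m : Int) (j : Nat) (hj9 : j ≤ 9) (h1 : 10 ^ j ≤ m) (h2 : m < 10 ^ (j + 1)) :
    containOneA m = 9 * ((magUp m 1 0 100).1 : Int) + PySem.Int.floordiv m (magUp m 1 0 100).2 := by
  have hm := magUp_eq m j h1 h2 100 0 (by omega) (by omega)
  rw [pow_zero] at hm
  rw [hm]
  unfold containOneA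
  rw [findA_eq m j h1 h2 100 (by omega)]

lemma main_k (n : Int) (k : Nat) (h10 : ¬ n ≤ 10) (hk9 : k ≤ 9)
    (h1 : 10 ^ k ≤ n) (h2 : n < 10 ^ (k + 1)) : contain_two n = contain_two_alt n := by
  unfold contain_two contain_two_alt
  rw [if_neg h10, if_neg h10]
  have hm := magUp_eq n k h1 h2 100 0 (by omega) (by omega)
  rw [pow_zero] at hm
  simp only [hm, findA_eq n k h1 h2 100 (by omega), gauss k]
  by_cases htmp : PySem.Int.mod n (10 ^ k) = 0
  · simp only [htmp]
    norm_num
  · rw [if_pos htmp, if_pos htmp]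
    have hpos : (0 : Int) < 10 ^ k := by positivity
    have hnn : 0 ≤ PySem.Int.mod n (10 ^ k) := by
      rw [PySem.Int.mod_eq_emod_of_pos hpos]
      exact Int.emod_nonneg n (by positivity)
    have hlt : PySem.Int.mod n (10 ^ k) < 10 ^ k := by
      rw [PySem.Int.mod_eq_emod_of_pos hpos]
      exact Int.emod_lt_of_pos n hpos
    obtain ⟨j, hj9, hj1, hj2⟩ := exists_decade (PySem.Int.mod n (10 ^ k)) (by omega)
      (lt_of_lt_of_le hlt (pow_le_pow_right₀ (by norm_num) (by omega)))
    rw [containOne_eq _ j hj9 hj1 hj2]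

-- ===== VERDICT (by name: the statement is the Claim_ definition above) =====
theorem contain_two_spec : Claim_equal_contain_two := by
  intro n hdom
  unfold Spec_contain_two
  by_cases hn : n ≤ 10
  · unfold contain_two contain_two_alt
    rw [if_pos hn, if_pos hn]
  · have hb : -2147483648 ≤ n ∧ n ≤ 2147483648 := by
      unfold Dom_contain_two pvDomInt at hdom
      exact of_decide_eq_true hdom
    have hub : n < 10 ^ 10 := by omega
    obtain ⟨k, hk9, h1, h2⟩ := exists_decade n (by omega) hub
    exact main_k n k hn hk9 h1 h2
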